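-- pv_equiv track=rewrite | github.com/Taepoung/Jump2Paper | hooks/scripts/check_output.py | _has_unclosed_string
-- ===== SOURCE A (Python) =====
-- def _has_unclosed_string(code: str) -> str | None:
--     """미종료 문자열 감지. 닫히지 않은 따옴표 종류 반환."""
--     for quote in ('"', "'"):
--         count = 0
--         i = 0
--         while i < len(code):
--             if code[i] == "\\" and i + 1 < len(code):
--                 i += 2
--                 continue
--             if code[i] == quote:
--                 count += 1
--             i += 1
--         if count % 2 != 0:
--             return quote
--     return None
-- ===== SOURCE B (Python) =====
-- import re
--
-- def _has_unclosed_string(code: str) -> str | None: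
--     """미종료 문자열 감지. 닫히지 않은 따옴표 종류 반환."""
--     cleaned = re.sub(r'\\.', '', code, flags=re.DOTALL)
--     for quote in ('"', "'"):
--         if cleaned.count(quote) % 2:
--             return quote
--     return None
-- ===== Notes on version B (the rewrite author's own statement) =====
-- stated objective: idiomatic
-- what changed: Replaces the per-quote manual index-walking loop (skipping escapes by i += 2) with a single escape-stripping pass (re.sub r'\.' with DOTALL) followed by parity counts of each quote in the cleaned string. (the cleaning and counting run in C-level library code instead of a per-character Python loop)
import Mathlib
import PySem

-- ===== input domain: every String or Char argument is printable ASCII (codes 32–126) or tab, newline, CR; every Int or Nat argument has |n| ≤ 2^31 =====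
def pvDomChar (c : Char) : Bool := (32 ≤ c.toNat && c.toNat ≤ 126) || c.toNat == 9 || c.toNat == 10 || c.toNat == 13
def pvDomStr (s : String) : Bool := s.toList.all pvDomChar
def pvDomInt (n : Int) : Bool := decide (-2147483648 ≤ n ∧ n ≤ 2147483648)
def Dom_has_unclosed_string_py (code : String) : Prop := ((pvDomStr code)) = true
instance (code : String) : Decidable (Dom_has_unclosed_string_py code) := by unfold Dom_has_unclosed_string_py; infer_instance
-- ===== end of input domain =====

-- B replaces A's per-quote manual index-walking loop by one escape-stripping pass (re.sub r'\\.')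
-- followed by parity counts over the cleaned string (objective: idiomatic decomposition).


-- ===== PORT A =====
-- A's while loop over index i: structural recursion over the remaining characters,
-- same state (count accumulator), same branch order (escape skip of 2, then quote test).
def pvALoop (quote : Char) : List Char → Nat → Nat
  | [], count => count
  | ['\\'], count => count            -- code[i] == '\\' but i + 1 = len: falls through; '\\' ≠ quote, i += 1
  | '\\' :: _ :: rest, count => pvALoop quote rest count   -- i += 2; continue
  | c :: rest, count => pvALoop quote rest (if c = quote then count + 1 else count)

def has_unclosed_string_py (code : String) : Option String :=
  if pvALoop '"' code.toList 0 % 2 ≠ 0 then some "\""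
  else if pvALoop '\'' code.toList 0 % 2 ≠ 0 then some "'"
  else none

-- ===== PORT B =====
-- re.sub(r'\\.', '', code, flags=re.DOTALL): remove each backslash together with its
-- following character, left to right, non-overlapping; a trailing lone backslash stays.
-- Exact hand port of that regex substitution (PySem has no regex primitive).
def pvCleanEsc : List Char → List Char
  | [] => []
  | '\\' :: _ :: rest => pvCleanEsc rest
  | c :: rest => c :: pvCleanEsc rest

def has_unclosed_string_py_alt (code : String) : Option String :=
  let cleaned := pvCleanEsc code.toList
  (['"', '\''].find? (fun q => cleaned.count q % 2 != 0)).map (fun q => String.ofList [q])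

-- ===== PRECONDITION & SPEC =====
def Spec_has_unclosed_string_py (code : String) (out : Option String) : Prop := out = has_unclosed_string_py_alt code
instance (code : String) (out : Option String) : Decidable (Spec_has_unclosed_string_py code out) := by unfold Spec_has_unclosed_string_py; infer_instance

-- ===== CLAIM (what is proved, stated in full; the proofs are below) =====
def Claim_equal_has_unclosed_string_py : Prop := ∀ (code : String), Dom_has_unclosed_string_py code → Spec_has_unclosed_string_py code (has_unclosed_string_py code)

-- ===== LEMMAS AND PROOFS =====

-- A's index walk counts exactly the quotes of the escape-stripped string.
theorem pvALoop_eq_count (quote : Char) (hq : quote ≠ '\\') :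
    ∀ (cs : List Char) (acc : Nat), pvALoop quote cs acc = acc + (pvCleanEsc cs).count quote := by
  intro cs
  induction cs using pvCleanEsc.induct with
  | case1 => intro acc; simp [pvALoop, pvCleanEsc]
  | case2 c rest ih =>
      intro acc; simp [pvALoop, pvCleanEsc, ih]
  | case3 c rest hne ih =>
      intro acc
      rcases rest with _ | ⟨d, rest'⟩
      · by_cases h : c = '\\'
        · subst h; simp [pvALoop, pvCleanEsc, (Ne.symm hq)]
        · simp [pvALoop, pvCleanEsc, List.count_cons, h]
          split <;> omega
      · have hc : c ≠ '\\' := by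
          intro h; exact hne d rest' (by rw [h]) rfl
        simp [pvALoop, pvCleanEsc, List.count_cons, ih]
        split <;> omega

-- ===== VERDICT (by name: the statement is the Claim_ definition above) =====
theorem has_unclosed_string_py_spec : Claim_equal_has_unclosed_string_py := by
  intro code _
  unfold Spec_has_unclosed_string_py has_unclosed_string_py has_unclosed_string_py_alt
  rw [pvALoop_eq_count '"' (by decide), pvALoop_eq_count '\'' (by decide)]
  simp only [Nat.zero_add, List.find?]
  rcases Nat.mod_two_eq_zero_or_one ((pvCleanEsc code.toList).count '"') with h1 | h1 <;>
    rcases Nat.mod_two_eq_zero_or_one ((pvCleanEsc code.toList).count '\'') with h2 | h2 <;>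
      simp [h1, h2]
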